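-- pv_equiv track=rewrite | github.com/calvinchankf/GoogleKickStart | 2020/B/c.py | f
-- ===== SOURCE A (Python) =====
-- def solve(s):
-- #     chars = []
-- #     for c in s:
-- #         chars.append(c)
-- #     return dfs(chars)
--
-- # def dfs(chars):
-- #     res = ''
-- #     num = 0
-- #     while len(chars) > 0:
-- #         pop = chars.pop(0)
-- #         if pop.isdigit():
-- #             num = num*10 + int(pop)
-- #         elif pop == '(':
-- #             res += num * dfs(chars)
-- #             num = 0
-- #         elif pop == ')':
-- #             return res
-- #         else:
-- #             res += pop
-- #     return res
--     cntStack = []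
--     strStack = [""]
--     num = 0
--     for c in s:
--         if c.isdigit():
--             num = num*10 + int(c)
--         elif c == '(':
--             cntStack.append(num)
--             num = 0
--             strStack.append("")
--         elif c == ')':
--             cnt = cntStack.pop()
--             cur = strStack.pop()
--             temp = cnt * cur
--             strStack[-1] += temp
--         else:
--             strStack[-1] += c
--     return strStack.pop()
--
-- def f(s):
--     intructions = solve(s)
--     toDown = 0
--     toRight = 0
--     for c in intructions:
--         if c == 'N':
--             toDown -= 1
--         elif c == 'S':
--             toDown += 1
--         elif c == 'W':
--             toRight -= 1
--         elif c == 'E':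
--             toRight += 1
--     # h = 1 + toDown
--     # w = 1 + toRight
--     h = (toDown + 10**9 ) % 10**9
--     w = (toRight + 10**9 ) % 10**9
--     return w + 1, h + 1
-- ===== SOURCE B (Python) =====
-- def f(s):
--     # Weighted single pass: keep a stack of multipliers (product of enclosing
--     # repeat counts) and add each move, scaled by the current multiplier,
--     # straight into the net displacement; no per-level string/vector popping.
--     M = 10 ** 9
--     mults = [1]
--     num = 0
--     down = 0
--     right = 0
--     for c in s:
--         if c.isdigit():
--             num = num * 10 + int(c)
--         elif c == '(':
--             mults.append(mults[-1] * num)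
--             num = 0
--         elif c == ')':
--             mults.pop()
--         elif c == 'N':
--             down -= mults[-1]
--         elif c == 'S':
--             down += mults[-1]
--         elif c == 'W':
--             right -= mults[-1]
--         elif c == 'E':
--             right += mults[-1]
--     return (right + M) % M + 1, (down + M) % M + 1
-- ===== Notes on version B (the rewrite author's own statement) =====
-- stated objective: faster
-- what changed: Instead of materialising the fully expanded instruction string on a string stack and then scanning it, B keeps a stack of multipliers (the product of enclosing repeat counts) and adds every move, scaled by the current multiplier, directly into one running net displacement, so the expanded string (exponential in the input length) is never built.
-- outside the precondition, e.g. on f(')'): A raises IndexError, B returns (1, 1); on f('E(N'): A returns (1, 1000000000), B returns (2, 1); on f('('): A returns (1, 1), B returns (1, 1)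
import Mathlib
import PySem

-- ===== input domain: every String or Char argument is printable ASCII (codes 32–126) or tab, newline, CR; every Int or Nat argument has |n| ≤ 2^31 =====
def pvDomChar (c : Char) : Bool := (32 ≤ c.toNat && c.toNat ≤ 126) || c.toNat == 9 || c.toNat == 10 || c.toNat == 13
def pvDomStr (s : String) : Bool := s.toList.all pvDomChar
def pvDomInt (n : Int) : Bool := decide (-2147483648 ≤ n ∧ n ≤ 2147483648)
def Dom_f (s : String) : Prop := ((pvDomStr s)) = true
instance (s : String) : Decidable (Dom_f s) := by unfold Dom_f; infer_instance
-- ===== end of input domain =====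

-- B replaces A's expanded-string stack by a stack of multipliers (products of the
-- enclosing repeat counts) and one running net displacement; equivalence is proved
-- on Pre_f (balanced parentheses), where A does not raise and no stale stack is left.

-- ===== PORT A =====
-- step of the final move-counting loop of A's `f` (literal body of its for-loop)
def moveStep (p : Int × Int) (c : Char) : Int × Int :=
  if c = 'N' then (p.1 - 1, p.2)
  else if c = 'S' then (p.1 + 1, p.2)
  else if c = 'W' then (p.1, p.2 - 1)
  else if c = 'E' then (p.1, p.2 + 1)
  else p

-- `cnt * cur` : Python string repetition (negative count gives the empty string)
def repChars (n : Int) (l : List Char) : List Char := (List.replicate n.toNat l).flatten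

-- A's `solve`: stacks with head = top; `none` = the IndexError of `cntStack.pop()`
-- on an unmatched ')' (excluded by Pre_f).
def solveA : List Char → List Int → List (List Char) → Int → Option (List Char)
  | [], _, strs, _ => strs.head?
  | c :: rest, cnts, strs, num =>
    if c.isDigit then
      solveA rest cnts strs (num * 10 + ((c.toNat : Int) - 48))
    else if c = '(' then
      solveA rest (num :: cnts) ([] :: strs) 0
    else if c = ')' then
      match cnts, strs with
      | cnt :: cnts', cur :: top :: strs' =>
          solveA rest cnts' ((top ++ repChars cnt cur) :: strs') num
      | _, _ => none
    else
      match strs with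
      | top :: strs' => solveA rest cnts ((top ++ [c]) :: strs') num
      | [] => none

def f (s : String) : List Int :=
  match solveA s.toList [] [[]] 0 with
  | some instr =>
      let p := instr.foldl moveStep (0, 0)
      let h := PySem.Int.mod (p.1 + 10 ^ 9) (10 ^ 9)
      let w := PySem.Int.mod (p.2 + 10 ^ 9) (10 ^ 9)
      [w + 1, h + 1]
  | none => []

-- ===== PORT B =====
-- B's loop: `mults` (head = top) holds the product of the enclosing repeat counts;
-- each move adds ±top straight into (down, right). `none` = the IndexError of
-- `mults[-1]` / `mults.pop()` on an exhausted stack (excluded by Pre_f).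
def solveC : List Char → List Int → Int → Int → Int → Option (Int × Int)
  | [], _, down, right, _ => some (down, right)
  | c :: rest, mults, down, right, num =>
    if c.isDigit then
      solveC rest mults down right (num * 10 + ((c.toNat : Int) - 48))
    else if c = '(' then
      match mults with
      | p :: _ => solveC rest ((p * num) :: mults) down right 0
      | [] => none
    else if c = ')' then
      match mults with
      | _ :: ms => solveC rest ms down right num
      | [] => none
    else if c = 'N' then
      match mults with
      | p :: _ => solveC rest mults (down - p) right num
      | [] => none
    else if c = 'S' then
      match mults with
      | p :: _ => solveC rest mults (down + p) right num
      | [] => none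
    else if c = 'W' then
      match mults with
      | p :: _ => solveC rest mults down (right - p) num
      | [] => none
    else if c = 'E' then
      match mults with
      | p :: _ => solveC rest mults down (right + p) num
      | [] => none
    else
      solveC rest mults down right num

def f_alt (s : String) : List Int :=
  match solveC s.toList [1] 0 0 0 with
  | some v =>
      [PySem.Int.mod (v.2 + 10 ^ 9) (10 ^ 9) + 1,
       PySem.Int.mod (v.1 + 10 ^ 9) (10 ^ 9) + 1]
  | none => []

-- ===== PRECONDITION & SPEC =====
-- Pre_f requires balanced parentheses: on an unmatched ')' A raises IndexError
-- (cntStack.pop() from an empty list), and on an unmatched '(' A's value comes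
-- only from the content after the last unclosed '(' — leftover stack state on
-- malformed input, an artefact of its implementation.
def Pre_f (s : String) : Prop :=
  (∀ p ∈ s.toList.inits, p.count ')' ≤ p.count '(') ∧
  s.toList.count '(' = s.toList.count ')'
instance (s : String) : Decidable (Pre_f s) := by unfold Pre_f; infer_instance

def pvWitness_f : String := "2(SE3(N))W"

def Spec_f (s : String) (out : List Int) : Prop := out = f_alt s
instance (s : String) (out : List Int) : Decidable (Spec_f s out) := by unfold Spec_f; infer_instance

-- ===== CLAIM (what is proved, stated in full; the proofs are below) =====
def Claim_equal_f : Prop := ∀ (s : String), Dom_f s → Pre_f s → Spec_f s (f s)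

-- ===== LEMMAS AND PROOFS =====

-- net displacement of an instruction string
def net (l : List Char) : Int × Int := l.foldl moveStep (0, 0)

theorem moveStep_shift (p : Int × Int) (c : Char) :
    moveStep p c = (p.1 + (moveStep (0, 0) c).1, p.2 + (moveStep (0, 0) c).2) := by
  unfold moveStep; split_ifs <;> simp [Prod.ext_iff] <;> omega

theorem foldl_moveStep_shift (l : List Char) (p : Int × Int) :
    l.foldl moveStep p = (p.1 + (net l).1, p.2 + (net l).2) := by
  induction l generalizing p with
  | nil => simp [net]
  | cons c t ih =>
      simp only [net, List.foldl_cons]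
      rw [ih (moveStep p c), ih (moveStep (0, 0) c), moveStep_shift p c]
      simp; constructor <;> ring

theorem net_append (a b : List Char) :
    net (a ++ b) = ((net a).1 + (net b).1, (net a).2 + (net b).2) := by
  simp only [net, List.foldl_append]
  exact foldl_moveStep_shift b (net a)

theorem net_rep (n : Nat) (l : List Char) :
    net ((List.replicate n l).flatten) = ((n : Int) * (net l).1, (n : Int) * (net l).2) := by
  induction n with
  | zero => simp [net]
  | succ m ih =>
      rw [List.replicate_succ, List.flatten_cons, net_append, ih]
      push_cast; simp [Prod.ext_iff]; constructor <;> ring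

-- mults chains down to the base multiplier 1 through nonnegative counts
def Chain : List Int → List Int → Prop
  | [p], [] => p = 1
  | p :: q :: ps, k :: ks => p = q * k ∧ 0 ≤ k ∧ Chain (q :: ps) ks
  | _, _ => False

-- net displacement of A's stack, each level weighted by its multiplier
def WSum : List Int → List (List Char) → Int × Int
  | p :: ps, t :: ts =>
      let w := WSum ps ts
      (w.1 + p * (net t).1, w.2 + p * (net t).2)
  | _, _ => (0, 0)

theorem solveC_eq_solveA (chars : List Char) :
    ∀ (cnts : List Int) (strs : List (List Char)) (mults : List Int)
      (down right num : Int),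
      0 ≤ num → Chain mults cnts → strs.length = mults.length →
      (down, right) = WSum mults strs →
      (∀ p ∈ chars.inits, p.count ')' ≤ cnts.length + p.count '(') →
      cnts.length + chars.count '(' = chars.count ')' →
      solveC chars mults down right num = Option.map net (solveA chars cnts strs num) := by
  induction chars with
  | nil =>
      intro cnts strs mults down right num hnum hch hlen hacc hdep1 hdep2
      simp only [List.count_nil, Nat.add_zero] at hdep2
      have hc : cnts = [] := List.length_eq_zero_iff.mp hdep2
      subst hc
      match mults, hch with
      | [p], hp =>
        have hp1 : p = 1 := hp
        subst hp1
        match strs, hlen with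
        | [t], _ =>
          simp only [WSum, Prod.mk.injEq] at hacc
          obtain ⟨h1, h2⟩ := hacc
          simp only [solveA, solveC, List.head?, Option.map_some, Option.some.injEq]
          apply Prod.ext <;> simp <;> omega
  | cons c rest ih =>
      intro cnts strs mults down right num hnum hch hlen hacc hdep1 hdep2
      have hd1tail : ∀ p ∈ rest.inits,
          ((c :: p).count ')') ≤ cnts.length + ((c :: p).count '(') := by
        intro p hp
        exact hdep1 (c :: p) (by simp [hp])
      simp only [List.count_cons] at hdep2
      by_cases hdg : c.isDigit
      · -- digit
        have hne1 : c ≠ '(' := by rintro rfl; simp at hdg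
        have hne2 : c ≠ ')' := by rintro rfl; simp at hdg
        have h48 : (48 : Int) ≤ c.toNat := by
          simp [Char.isDigit, UInt32.le_iff_toNat_le] at hdg
          omega
        simp only [solveA, solveC, hdg, if_pos]
        refine ih cnts strs mults down right _ (by omega) hch hlen hacc ?_ ?_
        · intro p hp
          have := hd1tail p hp
          simpa [List.count_cons, hne1, hne2] using this
        · simpa [hne1, hne2] using hdep2
      · by_cases ho : c = '('
        · subst ho
          match mults, hch with
          | p :: ps, hch =>
            match strs, hlen with
            | t :: ts, hlen =>
              simp only [solveA, solveC, hdg]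
              refine ih (num :: cnts) ([] :: (t :: ts)) ((p * num) :: p :: ps)
                down right 0 (by omega) ?_ (by simpa using hlen) ?_ ?_ ?_
              · exact ⟨rfl, hnum, hch⟩
              · simpa [WSum, net] using hacc
              · intro q hq
                have := hd1tail q hq
                simp only [List.count_cons] at this ⊢
                simp at this ⊢
                omega
              · simp at hdep2 ⊢
                omega
        · by_cases hcl : c = ')'
          · -- close paren
            have hcnts : cnts ≠ [] := by
              have h1 := hdep1 [c] (by simp)
              intro h; subst h; simp [hcl] at h1
            match cnts, hcnts with
            | k :: ks, _ =>
            match mults, hch with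
            | p :: q :: qs, hch =>
            obtain ⟨hpq, hk, hch'⟩ := hch
            match strs, hlen with
            | cur :: top :: ts, hlen =>
            simp only [solveA, solveC, hcl]
            refine ih ks ((top ++ repChars k cur) :: ts) (q :: qs) down right num
              hnum hch' (by simpa using hlen) ?_ ?_ ?_
            · rw [hacc]
              have hnet : net (top ++ repChars k cur) =
                  ((net top).1 + k * (net cur).1, (net top).2 + k * (net cur).2) := by
                rw [net_append]
                unfold repChars
                rw [net_rep k.toNat cur, Int.toNat_of_nonneg hk]
              subst hpq
              simp only [WSum, hnet, Prod.mk.injEq]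
              constructor <;> ring
            · intro q' hq'
              have := hd1tail q' hq'
              simp [hcl] at this ⊢
              omega
            · simp [hcl] at hdep2 ⊢
              omega
          · -- plain character
            match mults, hch with
            | p :: ps, hch =>
            match strs, hlen with
            | top :: ts, hlen =>
            simp only [WSum, Prod.mk.injEq] at hacc
            obtain ⟨h1, h2⟩ := hacc
            subst h1; subst h2
            have hlen' : (List.length ts : Int) + 1 = (List.length ps : Int) + 1 := by
              simp at hlen; omega
            have hdep1' : ∀ q ∈ rest.inits, q.count ')' ≤ cnts.length + q.count '(' := by
              intro q hq
              have := hd1tail q hq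
              simp [ho, hcl] at this ⊢
              omega
            have hdep2' : cnts.length + rest.count '(' = rest.count ')' := by
              simp [ho, hcl] at hdep2
              omega
            have happly : ∀ (d1 d2 : Int), net [c] = (d1, d2) →
                solveC rest (p :: ps) ((WSum ps ts).1 + p * (net top).1 + p * d1)
                    ((WSum ps ts).2 + p * (net top).2 + p * d2) num =
                  Option.map net (solveA rest cnts ((top ++ [c]) :: ts) num) := by
              intro d1 d2 hnc
              refine ih cnts ((top ++ [c]) :: ts) (p :: ps) _ _ num hnum hch
                (by simpa using hlen) ?_ hdep1' hdep2'
              simp only [WSum]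
              rw [net_append, hnc]
              simp only [Prod.mk.injEq]
              constructor <;> ring
            by_cases hN : c = 'N'
            · simp only [solveA, solveC, hdg, ho, hcl]
              rw [if_pos hN]
              have := happly (-1) 0 (by rw [hN]; simp [net, moveStep])
              simpa [sub_eq_add_neg, mul_neg, add_assoc] using this
            · by_cases hS : c = 'S'
              · simp only [solveA, solveC, hdg, ho, hcl]
                rw [if_neg hN, if_pos hS]
                have := happly 1 0 (by rw [hS]; simp [net, moveStep])
                simpa [add_assoc] using this
              · by_cases hW : c = 'W'
                · simp only [solveA, solveC, hdg, ho, hcl]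
                  rw [if_neg hN, if_neg hS, if_pos hW]
                  have := happly 0 (-1) (by rw [hW]; simp [net, moveStep])
                  simpa [sub_eq_add_neg, mul_neg, add_assoc] using this
                · by_cases hE : c = 'E'
                  · simp only [solveA, solveC, hdg, ho, hcl]
                    rw [if_neg hN, if_neg hS, if_neg hW, if_pos hE]
                    have := happly 0 1 (by rw [hE]; simp [net, moveStep])
                    simpa [add_assoc] using this
                  · simp only [solveA, solveC, hdg, ho, hcl]
                    rw [if_neg hN, if_neg hS, if_neg hW, if_neg hE]
                    have := happly 0 0 (by simp [net, moveStep, hN, hS, hW, hE])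
                    simpa using this

-- ===== VERDICT (by name: the statement is the Claim_ definition above) =====
theorem f_spec : Claim_equal_f := by
  intro s _ hpre
  unfold Spec_f f f_alt
  have h := solveC_eq_solveA s.toList [] [[]] [1] 0 0 0 (by omega) (by simp [Chain])
    (by simp) (by simp [WSum, net]) (by simpa using hpre.1) (by simpa using hpre.2)
  rw [h]
  cases hA : solveA s.toList [] [[]] 0 with
  | none => simp
  | some instr => simp [net]
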